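-- pv_equiv track=rewrite | github.com/Bucco369/ALMReady-03022026-FrontBack | backend/app/main.py | _to_subcategory_id
-- ===== SOURCE A (Python) =====
-- import unicodedata
--
-- POSITION_PREFIXES = ("A_", "L_", "E_", "D_")
--
-- SUBCATEGORY_ID_ALIASES = {
--     "mortgages": "mortgages",
--     "loans": "loans",
--     "securities": "securities",
--     "interbank / central bank": "interbank",
--     "other assets": "other-assets",
--     "deposits": "deposits",
--     "term deposits": "term-deposits",
--     "wholesale funding": "wholesale-funding",
--     "debt issued": "debt-issued",
--     "other liabilities": "other-liabilities",
--     "equity": "equity",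
-- }
--
-- def _slugify(text: str) -> str:
--     normalized = unicodedata.normalize("NFD", str(text))
--     normalized = "".join(ch for ch in normalized if unicodedata.category(ch) != "Mn")
--     normalized = normalized.lower().strip()
--
--     out: list[str] = []
--     prev_dash = False
--     for ch in normalized:
--         if ch.isalnum():
--             out.append(ch)
--             prev_dash = False
--         else:
--             if not prev_dash:
--                 out.append("-")
--                 prev_dash = True
--
--     return "".join(out).strip("-") or "unknown"
--
-- def _to_subcategory_id(subcategoria_ui: str | None, sheet_name: str) -> str:
--     label = (subcategoria_ui or "").strip()
--     if label:
--         mapped = SUBCATEGORY_ID_ALIASES.get(label.lower())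
--         if mapped:
--             return mapped
--         return _slugify(label)
--
--     # fallback to sheet name without prefix
--     cleaned_sheet = sheet_name
--     for prefix in POSITION_PREFIXES:
--         if cleaned_sheet.startswith(prefix):
--             cleaned_sheet = cleaned_sheet[len(prefix) :]
--             break
--     return _slugify(cleaned_sheet.replace("_", " "))
-- ===== SOURCE B (Python) =====
-- import unicodedata
-- from itertools import groupby
--
-- POSITION_PREFIXES = ("A_", "L_", "E_", "D_")
--
-- SUBCATEGORY_ID_ALIASES = {
--     "mortgages": "mortgages",
--     "loans": "loans",
--     "securities": "securities",
--     "interbank / central bank": "interbank",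
--     "other assets": "other-assets",
--     "deposits": "deposits",
--     "term deposits": "term-deposits",
--     "wholesale funding": "wholesale-funding",
--     "debt issued": "debt-issued",
--     "other liabilities": "other-liabilities",
--     "equity": "equity",
-- }
--
-- def _slugify(text: str) -> str:
--     normalized = unicodedata.normalize("NFD", str(text))
--     normalized = "".join(ch for ch in normalized if unicodedata.category(ch) != "Mn")
--     normalized = normalized.lower().strip()
--     words = ("".join(g) for k, g in groupby(normalized, key=str.isalnum) if k)
--     return "-".join(words) or "unknown"
--
-- def _to_subcategory_id(subcategoria_ui, sheet_name):
--     label = (subcategoria_ui or "").strip()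
--     if label:
--         return SUBCATEGORY_ID_ALIASES.get(label.lower()) or _slugify(label)
--     prefix = next((p for p in POSITION_PREFIXES if sheet_name.startswith(p)), "")
--     return _slugify(sheet_name[len(prefix):].replace("_", " "))
-- ===== Notes on version B (the rewrite author's own statement) =====
-- stated objective: alternative
-- what changed: B's _slugify replaces A's character-by-character loop with a prev_dash flag followed by strip('-') by grouping the normalized string into maximal runs with itertools.groupby(key=str.isalnum), keeping the alphanumeric runs and joining them with '-'; the prefix loop becomes a next()/generator lookup.
import Mathlib
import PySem

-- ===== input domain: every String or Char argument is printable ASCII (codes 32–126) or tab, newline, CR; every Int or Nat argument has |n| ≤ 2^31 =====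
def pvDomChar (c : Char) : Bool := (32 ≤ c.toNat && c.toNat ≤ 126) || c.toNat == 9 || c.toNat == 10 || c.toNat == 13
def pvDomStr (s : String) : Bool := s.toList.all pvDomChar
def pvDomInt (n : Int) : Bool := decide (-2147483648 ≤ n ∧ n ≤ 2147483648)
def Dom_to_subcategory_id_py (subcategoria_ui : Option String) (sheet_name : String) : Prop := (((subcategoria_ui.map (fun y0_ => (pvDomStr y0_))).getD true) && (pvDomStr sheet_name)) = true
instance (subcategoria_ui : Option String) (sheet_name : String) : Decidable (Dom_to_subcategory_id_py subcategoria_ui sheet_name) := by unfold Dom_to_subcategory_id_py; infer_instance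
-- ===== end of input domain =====

-- B replaces A's character-by-character dash loop (prev_dash flag + strip('-')) in _slugify by
-- grouping the string into maximal alnum runs (itertools.groupby) and joining them with '-';
-- objective: alternative decomposition, same asymptotic cost.

-- shared module constants of Source A / Source B
def pvPositionPrefixes : List String := ["A_", "L_", "E_", "D_"]

def pvAliases : PySem.Dict String String := PySem.Dict.ofList [
  ("mortgages", "mortgages"),
  ("loans", "loans"),
  ("securities", "securities"),
  ("interbank / central bank", "interbank"),
  ("other assets", "other-assets"),
  ("deposits", "deposits"),
  ("term deposits", "term-deposits"),
  ("wholesale funding", "wholesale-funding"),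
  ("debt issued", "debt-issued"),
  ("other liabilities", "other-liabilities"),
  ("equity", "equity")]

-- ===== PORT A =====
-- the for-loop of A's _slugify over (out, prev_dash), as structural recursion building out front-to-back
def slugLoopA (prev_dash : Bool) : List Char → List Char
  | [] => []
  | ch :: rest =>
    if PySem.Chars.isalnum ch then ch :: slugLoopA false rest
    else if !prev_dash then '-' :: slugLoopA true rest
    else slugLoopA prev_dash rest

-- A's _slugify; unicodedata.normalize("NFD",·) and dropping category-Mn chars are the identity on
-- the printable-ASCII input domain, so that preamble is ported as the identity (exact on Dom).
def slugifyA (text : String) : String :=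
  let normalized := PySem.Str.strip (PySem.Str.lower text)
  let out := slugLoopA false normalized.toList
  let s := PySem.Str.stripChars (String.ofList out) "-"
  if s = "" then "unknown" else s

-- the `for prefix in POSITION_PREFIXES: if startswith: …; break` loop
def cleanSheetA (s : String) : List String → String
  | [] => s
  | p :: ps =>
    if PySem.Str.startswith s p then String.ofList (PySem.List.slice s.toList (some (PySem.Str.len p)) none)
    else cleanSheetA s ps

def to_subcategory_id_py (subcategoria_ui : Option String) (sheet_name : String) : String :=
  let label := PySem.Str.strip (subcategoria_ui.getD "")
  if label ≠ "" then
    match pvAliases.get? (PySem.Str.lower label) with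
    | some mapped => if mapped ≠ "" then mapped else slugifyA label
    | none => slugifyA label
  else
    let cleaned_sheet := cleanSheetA sheet_name pvPositionPrefixes
    slugifyA (PySem.Str.replace cleaned_sheet "_" " ")

-- ===== PORT B =====
-- itertools.groupby(·, key=str.isalnum): maximal runs of equal key, in order
def groupRunsB : List Char → List (List Char)
  | [] => []
  | c :: rest =>
    match groupRunsB rest with
    | [] => [[c]]
    | [] :: gs => [c] :: [] :: gs   -- unreachable: groups are never empty
    | (d :: g) :: gs =>
      if PySem.Chars.isalnum c == PySem.Chars.isalnum d then (c :: d :: g) :: gs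
      else [c] :: (d :: g) :: gs

-- B's _slugify: keep only the alnum groups, join with '-' (NFD/Mn preamble: identity on Dom, as in A)
def slugifyB (text : String) : String :=
  let normalized := PySem.Str.strip (PySem.Str.lower text)
  let words := ((groupRunsB normalized.toList).filter
      (fun g => g.head?.any PySem.Chars.isalnum)).map String.ofList
  let s := PySem.Str.join "-" words
  if s = "" then "unknown" else s

def to_subcategory_id_py_alt (subcategoria_ui : Option String) (sheet_name : String) : String :=
  let label := PySem.Str.strip (subcategoria_ui.getD "")
  if label ≠ "" then
    match pvAliases.get? (PySem.Str.lower label) with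
    | some mapped => if mapped = "" then slugifyB label else mapped
    | none => slugifyB label
  else
    let pfx := (pvPositionPrefixes.find? (fun p => PySem.Str.startswith sheet_name p)).getD ""
    let cleaned := String.ofList (PySem.List.slice sheet_name.toList (some (PySem.Str.len pfx)) none)
    slugifyB (PySem.Str.replace cleaned "_" " ")

-- ===== PRECONDITION & SPEC =====
def Spec_to_subcategory_id_py (subcategoria_ui : Option String) (sheet_name : String) (out : String) : Prop := out = to_subcategory_id_py_alt subcategoria_ui sheet_name
instance (subcategoria_ui : Option String) (sheet_name : String) (out : String) : Decidable (Spec_to_subcategory_id_py subcategoria_ui sheet_name out) := by unfold Spec_to_subcategory_id_py; infer_instance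

-- ===== CLAIM (what is proved, stated in full; the proofs are below) =====
def Claim_equal_to_subcategory_id_py : Prop := ∀ (subcategoria_ui : Option String) (sheet_name : String), Dom_to_subcategory_id_py subcategoria_ui sheet_name → Spec_to_subcategory_id_py subcategoria_ui sheet_name (to_subcategory_id_py subcategoria_ui sheet_name)

-- ===== LEMMAS AND PROOFS =====

-- abbreviations used only by the proofs
def pvDash (c : Char) : Bool := ['-'].contains c
def pvRstrip (l : List Char) : List Char := (List.dropWhile pvDash l.reverse).reverse
def pvW (l : List Char) : List Char :=
  List.intercalate ['-'] ((groupRunsB l).filter (fun g => g.head?.any PySem.Chars.isalnum))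

theorem pvDash_of_alnum {c : Char} (h : PySem.Chars.isalnum c = true) : pvDash c = false := by
  by_contra hc
  have hcd : c = '-' := by simpa [pvDash] using hc
  subst hcd
  have : PySem.Chars.isalnum '-' = false := by decide
  simp [this] at h

-- intercalate helpers
theorem inter_single (a : List Char) : List.intercalate ['-'] [a] = a := by
  simp [List.intercalate]

theorem inter_cons_cons (a b : List Char) (t : List (List Char)) :
    List.intercalate ['-'] (a :: b :: t) = a ++ '-' :: List.intercalate ['-'] (b :: t) := by
  simp [List.intercalate, List.intersperse]

theorem inter_ne_nil (c : Char) (a : List Char) (t : List (List Char)) :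
    List.intercalate ['-'] ((c :: a) :: t) ≠ [] := by
  cases t with
  | nil => simp [inter_single]
  | cons b t' => rw [inter_cons_cons]; simp

theorem inter_head (c : Char) (a : List Char) (T : List (List Char)) :
    List.intercalate ['-'] ((c :: a) :: T) = c :: List.intercalate ['-'] (a :: T) := by
  cases T with
  | nil => rw [inter_single, inter_single]
  | cons b t' => rw [inter_cons_cons, inter_cons_cons]; rfl

-- groupRunsB shape lemmas
theorem gr_shape (d : Char) (rest : List Char) :
    ∃ t gs, groupRunsB (d :: rest) = (d :: t) :: gs := by
  unfold groupRunsB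
  rcases h : groupRunsB rest with _ | ⟨g, gs⟩
  · exact ⟨[], [], rfl⟩
  · cases g with
    | nil => exact ⟨[], [] :: gs, rfl⟩
    | cons e g' =>
      by_cases hk : (PySem.Chars.isalnum d == PySem.Chars.isalnum e) = true
      · exact ⟨e :: g', gs, by simp [hk]⟩
      · exact ⟨[], (e :: g') :: gs, by simp [hk]⟩

theorem gr_cons_of_shape {d : Char} {rest : List Char} {t : List Char} {gs : List (List Char)}
    (hg : groupRunsB (d :: rest) = (d :: t) :: gs) (c : Char) :
    groupRunsB (c :: d :: rest) =
      if PySem.Chars.isalnum c == PySem.Chars.isalnum d then (c :: d :: t) :: gs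
      else [c] :: (d :: t) :: gs := by
  conv_lhs => unfold groupRunsB
  rw [hg]

theorem gr_singleton (c : Char) : groupRunsB [c] = [[c]] := rfl

theorem gr_ne_nil : ∀ (l : List Char), ∀ g ∈ groupRunsB l, g ≠ [] := by
  intro l
  induction l with
  | nil => simp [groupRunsB]
  | cons c rest ih =>
    cases rest with
    | nil =>
      intro g hg
      rw [gr_singleton] at hg
      simp at hg
      simp [hg]
    | cons d r =>
      obtain ⟨t, gs, hg⟩ := gr_shape d r
      intro g hmem
      rw [gr_cons_of_shape hg c] at hmem
      by_cases hk : (PySem.Chars.isalnum c == PySem.Chars.isalnum d) = true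
      · rw [if_pos hk] at hmem
        rcases List.mem_cons.mp hmem with h1 | h2
        · simp [h1]
        · exact ih g (hg ▸ List.mem_cons_of_mem _ h2)
      · rw [if_neg hk] at hmem
        rcases List.mem_cons.mp hmem with h1 | h2
        · simp [h1]
        · exact ih g (hg ▸ h2)

-- pvW equations
theorem pvW_nil : pvW [] = [] := by simp [pvW, groupRunsB, List.intercalate]

theorem pvW_false {c : Char} (rest : List Char) (hc : PySem.Chars.isalnum c = false) :
    pvW (c :: rest) = pvW rest := by
  cases rest with
  | nil => simp [pvW, groupRunsB, hc, List.intercalate]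
  | cons d r =>
    obtain ⟨t, gs, hg⟩ := gr_shape d r
    unfold pvW
    rw [gr_cons_of_shape hg c, hg]
    cases hd : PySem.Chars.isalnum d with
    | false => simp [hc, hd, List.filter]
    | true => simp [hc, hd, List.filter]

theorem pvW_head_ne_nil {d : Char} (r : List Char) (hd : PySem.Chars.isalnum d = true) :
    pvW (d :: r) ≠ [] := by
  obtain ⟨t, gs, hg⟩ := gr_shape d r
  unfold pvW
  rw [hg]
  have : List.filter (fun g => g.head?.any PySem.Chars.isalnum) ((d :: t) :: gs)
      = (d :: t) :: List.filter (fun g => g.head?.any PySem.Chars.isalnum) gs := by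
    simp [List.filter, hd]
  rw [this]
  exact inter_ne_nil d t _

theorem pvW_true_sep {c : Char} {rest : List Char} (hc : PySem.Chars.isalnum c = true)
    (hrest : rest = [] ∨ ∃ d r, rest = d :: r ∧ PySem.Chars.isalnum d = false) :
    pvW (c :: rest) = c :: (if pvW rest = [] then [] else '-' :: pvW rest) := by
  rcases hrest with h | ⟨d, r, hdr, hd⟩
  · subst h
    rw [pvW_nil]
    simp [pvW, groupRunsB, hc, inter_single, List.filter]
  · subst hdr
    obtain ⟨t, gs, hg⟩ := gr_shape d r
    have hk : (PySem.Chars.isalnum c == PySem.Chars.isalnum d) = false := by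
      simp [hc, hd]
    unfold pvW
    rw [gr_cons_of_shape hg c, hk, hg]
    simp only [Bool.false_eq_true, if_false]
    have hfc : List.filter (fun g => g.head?.any PySem.Chars.isalnum) ([c] :: (d :: t) :: gs)
        = [c] :: List.filter (fun g => g.head?.any PySem.Chars.isalnum) gs := by
      simp [List.filter, hc, hd]
    have hfd : List.filter (fun g => g.head?.any PySem.Chars.isalnum) ((d :: t) :: gs)
        = List.filter (fun g => g.head?.any PySem.Chars.isalnum) gs := by
      simp [List.filter, hd]
    rw [hfc, hfd]
    rcases hf : List.filter (fun g => g.head?.any PySem.Chars.isalnum) gs with _ | ⟨g0, gs0⟩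
    · rw [hf]
      have h0 : List.intercalate ['-'] ([] : List (List Char)) = [] := by simp [List.intercalate]
      rw [inter_single, h0, if_pos rfl]
    · have hg0 : g0 ∈ groupRunsB (d :: r) := by
        rw [hg]
        have hm : g0 ∈ List.filter (fun g => g.head?.any PySem.Chars.isalnum) gs := by
          rw [hf]; exact List.mem_cons_self
        exact List.mem_cons_of_mem _ (List.mem_of_mem_filter hm)
      have hne := gr_ne_nil _ _ hg0
      rcases g0 with _ | ⟨e, g0'⟩
      · exact absurd rfl hne
      · rw [hf, if_neg (inter_ne_nil e g0' gs0), inter_cons_cons]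
        rfl

theorem pvW_true_true {c d : Char} (r : List Char) (hc : PySem.Chars.isalnum c = true)
    (hd : PySem.Chars.isalnum d = true) :
    pvW (c :: d :: r) = c :: pvW (d :: r) := by
  obtain ⟨t, gs, hg⟩ := gr_shape d r
  have hk : (PySem.Chars.isalnum c == PySem.Chars.isalnum d) = true := by simp [hc, hd]
  unfold pvW
  rw [gr_cons_of_shape hg c, hk, hg]
  simp only [if_true]
  have h1 : List.filter (fun g => g.head?.any PySem.Chars.isalnum) ((c :: d :: t) :: gs)
      = (c :: d :: t) :: List.filter (fun g => g.head?.any PySem.Chars.isalnum) gs := by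
    simp [List.filter, hc]
  have h2 : List.filter (fun g => g.head?.any PySem.Chars.isalnum) ((d :: t) :: gs)
      = (d :: t) :: List.filter (fun g => g.head?.any PySem.Chars.isalnum) gs := by
    simp [List.filter, hd]
  rw [h1, h2, inter_head]

-- pvRstrip equations
theorem rstrip_cons (c : Char) (xs : List Char) :
    pvRstrip (c :: xs) = if pvRstrip xs = [] then (if pvDash c then [] else [c]) else c :: pvRstrip xs := by
  unfold pvRstrip
  rw [List.reverse_cons, List.dropWhile_append]
  rcases h : List.dropWhile pvDash xs.reverse with _ | ⟨y, ys⟩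
  · simp [List.dropWhile]
    cases hd : pvDash c <;> simp
  · have hne : ((y :: ys) : List Char).isEmpty = false := rfl
    simp [hne]

-- the slugLoopA dash-structure lemmas
theorem loopA_true_no_dash : ∀ l : List Char,
    List.dropWhile pvDash (slugLoopA true l) = slugLoopA true l := by
  intro l
  induction l with
  | nil => rfl
  | cons c rest ih =>
    cases hc : PySem.Chars.isalnum c with
    | true =>
      show List.dropWhile pvDash (slugLoopA true (c :: rest)) = _
      unfold slugLoopA
      rw [hc]
      simp [pvDash_of_alnum hc]
    | false =>
      show List.dropWhile pvDash (slugLoopA true (c :: rest)) = _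
      unfold slugLoopA
      rw [hc]
      simpa using ih

theorem dropWhile_loopA_false : ∀ l : List Char,
    List.dropWhile pvDash (slugLoopA false l) = slugLoopA true l := by
  intro l
  cases l with
  | nil => rfl
  | cons c rest =>
    cases hc : PySem.Chars.isalnum c with
    | true =>
      unfold slugLoopA
      rw [hc]
      simp [pvDash_of_alnum hc]
    | false =>
      unfold slugLoopA
      rw [hc]
      have hdash : pvDash '-' = true := rfl
      simp only [Bool.not_false, if_true]
      show List.dropWhile pvDash ('-' :: slugLoopA true rest) = _
      rw [List.dropWhile_cons_of_pos rfl]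
      exact loopA_true_no_dash rest

theorem loopA_cons (b : Bool) (c : Char) (rest : List Char) :
    slugLoopA b (c :: rest) =
      if PySem.Chars.isalnum c then c :: slugLoopA false rest
      else if !b then '-' :: slugLoopA true rest else slugLoopA b rest := rfl

-- the central invariant: rstrip of A's loop (entered with prev_dash = true) is B's joined words
theorem main_loop : ∀ l : List Char, pvRstrip (slugLoopA true l) = pvW l := by
  intro l
  induction l with
  | nil => rw [pvW_nil]; rfl
  | cons c rest ih =>
    cases hc : PySem.Chars.isalnum c with
    | false =>
      have hl : slugLoopA true (c :: rest) = slugLoopA true rest := by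
        simp [loopA_cons, hc]
      rw [hl, ih, pvW_false rest hc]
    | true =>
      have hl : slugLoopA true (c :: rest) = c :: slugLoopA false rest := by
        simp [loopA_cons, hc]
      rw [hl, rstrip_cons, pvDash_of_alnum hc]
      cases rest with
      | nil =>
        have : pvRstrip (slugLoopA false []) = [] := rfl
        rw [this, if_pos rfl, pvW_true_sep hc (Or.inl rfl), pvW_nil]
        rfl
      | cons d r =>
        cases hd : PySem.Chars.isalnum d with
        | true =>
          have hfd : slugLoopA false (d :: r) = slugLoopA true (d :: r) := by
            simp [loopA_cons, hd]
          rw [hfd, ih]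
          rw [if_neg (pvW_head_ne_nil r hd), pvW_true_true r hc hd]
        | false =>
          have hfd : slugLoopA false (d :: r) = '-' :: slugLoopA true r := by
            simp [loopA_cons, hd]
          have htd : slugLoopA true (d :: r) = slugLoopA true r := by
            simp [loopA_cons, hd]
          rw [hfd, rstrip_cons]
          have hdash : pvDash '-' = true := rfl
          rw [hdash]
          have hR : pvRstrip (slugLoopA true r) = pvW (d :: r) := by
            rw [← htd, ih]
          rw [hR, pvW_true_sep hc (Or.inr ⟨d, r, rfl, hd⟩)]
          rcases hW : pvW (d :: r) with _ | ⟨w, ws⟩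
          · simp
          · simp

-- the two slugify implementations agree
theorem str_ext {a b : String} (h : a.toList = b.toList) : a = b := by
  have h2 := congrArg String.ofList h
  simpa using h2

theorem slugify_eq (t : String) : slugifyA t = slugifyB t := by
  have hkey : ∀ nl : List Char,
      PySem.Str.stripChars (String.ofList (slugLoopA false nl)) "-"
      = PySem.Str.join "-" (((groupRunsB nl).filter
          (fun g => g.head?.any PySem.Chars.isalnum)).map String.ofList) := by
    intro nl
    apply str_ext
    rw [PySem.Str.toList_stripChars, PySem.Str.toList_join]
    have h1 : (String.ofList (slugLoopA false nl)).toList = slugLoopA false nl := by simp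
    rw [h1]
    have hA : PySem.Chars.stripChars (slugLoopA false nl) ['-'] = pvW nl := by
      show (List.dropWhile pvDash (List.dropWhile pvDash (slugLoopA false nl)).reverse).reverse = _
      rw [dropWhile_loopA_false]
      exact main_loop nl
    have hB : PySem.Chars.join ['-'] (List.map String.toList (((groupRunsB nl).filter
        (fun g => g.head?.any PySem.Chars.isalnum)).map String.ofList)) = pvW nl := by
      rw [List.map_map]
      have hco : (String.toList ∘ String.ofList) = id := by funext l; simp
      rw [hco, List.map_id]
      rfl
    show PySem.Chars.stripChars (slugLoopA false nl) ['-'] = PySem.Chars.join ['-'] _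
    rw [hA, hB]
  simp only [slugifyA, slugifyB, hkey]

-- the sheet-prefix cleaning agrees
theorem clean_eq (s : String) :
    cleanSheetA s pvPositionPrefixes
      = String.ofList (PySem.List.slice s.toList
          (some (PySem.Str.len ((pvPositionPrefixes.find? (fun p => PySem.Str.startswith s p)).getD ""))) none) := by
  have hz : String.ofList (PySem.List.slice s.toList (some (PySem.Str.len "")) none) = s := by
    have h0 : PySem.Str.len "" = ((0 : Nat) : Int) := rfl
    rw [h0, PySem.List.slice_from s.toList (by exact_mod_cast Int.le_refl 0)]
    simp
  simp only [pvPositionPrefixes]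
  by_cases h1 : PySem.Str.startswith s "A_" = true
  · rw [List.find?_cons_of_pos h1]
    simp only [cleanSheetA, Option.getD_some]
    rw [if_pos h1]
  · rw [List.find?_cons_of_neg h1]
    by_cases h2 : PySem.Str.startswith s "L_" = true
    · rw [List.find?_cons_of_pos h2]
      simp only [cleanSheetA, Option.getD_some]
      rw [if_neg h1, if_pos h2]
    · rw [List.find?_cons_of_neg h2]
      by_cases h3 : PySem.Str.startswith s "E_" = true
      · rw [List.find?_cons_of_pos h3]
        simp only [cleanSheetA, Option.getD_some]
        rw [if_neg h1, if_neg h2, if_pos h3]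
      · rw [List.find?_cons_of_neg h3]
        by_cases h4 : PySem.Str.startswith s "D_" = true
        · rw [List.find?_cons_of_pos h4]
          simp only [cleanSheetA, Option.getD_some]
          rw [if_neg h1, if_neg h2, if_neg h3, if_pos h4]
        · rw [List.find?_cons_of_neg h4]
          simp only [List.find?_nil, Option.getD_none]
          simp only [cleanSheetA]
          rw [if_neg h1, if_neg h2, if_neg h3, if_neg h4, hz]

-- ===== VERDICT (by name: the statement is the Claim_ definition above) =====
theorem to_subcategory_id_py_spec : Claim_equal_to_subcategory_id_py := by
  intro ui sheet _
  show to_subcategory_id_py ui sheet = to_subcategory_id_py_alt ui sheet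
  simp only [to_subcategory_id_py, to_subcategory_id_py_alt]
  by_cases hl : PySem.Str.strip (ui.getD "") ≠ ""
  · rw [if_pos hl, if_pos hl]
    rcases hm : pvAliases.get? (PySem.Str.lower (PySem.Str.strip (ui.getD ""))) with _ | m
    · exact slugify_eq _
    · show (if m ≠ "" then m else slugifyA (PySem.Str.strip (ui.getD "")))
          = (if m = "" then slugifyB (PySem.Str.strip (ui.getD "")) else m)
      by_cases hme : m = ""
      · rw [if_neg (by simp [hme]), if_pos hme]
        exact slugify_eq _
      · rw [if_pos hme, if_neg hme]
  · rw [if_neg hl, if_neg hl]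
    rw [clean_eq sheet]
    exact slugify_eq _
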